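-- pv_equiv track=rewrite | github.com/code-lgtm/Problem-Solving | graduate_algorithms/digits_sum.py | solve
-- ===== SOURCE A (Python) =====
-- def solve(A, B):
--   M = 1000000007
--   D = [[0 for _ in range(B+1)] for _ in range(A+1)]
--
--   for i in range(1, 10):
--     if i <= B:
--       D[1][i] = 1
--
--   for i in range(2, A+1):
--     for k in range(1, B+1):
--       D[i][k] = (D[i][k] + D[i-1][k]) % M
--       for j in range(1, 10):
--         if k+j <= B:
--           D[i][k+j] = (D[i][k+j] + D[i-1][k]) % M
--
--   return D[A][B]
-- ===== SOURCE B (Python) =====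
-- def solve(A, B):
--     M = 1000000007
--     row = [1 if 1 <= s <= 9 else 0 for s in range(B + 1)]
--     for _ in range(A - 1):
--         pref = [0] * (B + 2)
--         for s in range(B + 1):
--             pref[s + 1] = (pref[s] + row[s]) % M
--         row = [(pref[s + 1] - pref[s - 9 if s >= 9 else 0]) % M for s in range(B + 1)]
--     return row[B]
-- ===== Notes on version B (the rewrite author's own statement) =====
-- stated objective: faster
-- what changed: Replaces A's (A+1)x(B+1) in-place push-DP table (each cell scatters into up to 10 cells of the next row) by a rolling one-dimensional row recomputed per digit with a prefix-sum array, so each new cell is one window subtraction pref[s+1]-pref[max(s-9,0)] instead of ten scattered updates.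
import Mathlib
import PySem

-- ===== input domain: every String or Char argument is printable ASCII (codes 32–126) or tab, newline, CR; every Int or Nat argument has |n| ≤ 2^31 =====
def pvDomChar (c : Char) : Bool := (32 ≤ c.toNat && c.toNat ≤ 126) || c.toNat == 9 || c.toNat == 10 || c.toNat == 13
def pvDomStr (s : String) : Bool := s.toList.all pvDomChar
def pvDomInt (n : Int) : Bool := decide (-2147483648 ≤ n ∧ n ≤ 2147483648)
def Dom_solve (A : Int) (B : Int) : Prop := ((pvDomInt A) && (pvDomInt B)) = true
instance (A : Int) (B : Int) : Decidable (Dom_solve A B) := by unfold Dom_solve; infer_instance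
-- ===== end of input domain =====

-- B replaces A's 2-D in-place "push" DP table by a rolling 1-D row updated with prefix sums
-- (one window subtraction per cell instead of up to ten scattered updates).

-- ===== PORT A =====
-- The Python 2-D list D (all cells start at 0) is modeled as a row-indexed map of
-- column-indexed maps: pvUpd D i k v is the assignment D[i][k] = v, pvGet D i k the read
-- D[i][k] (unassigned cells read 0).  Out-of-range indexing (IndexError in Python,
-- e.g. A = 0 with B ≥ 1, or negative A/B) is excluded by Pre_solve.
def pvUpd (D : Std.TreeMap Int (Std.TreeMap Int Int)) (i k v : Int) :
    Std.TreeMap Int (Std.TreeMap Int Int) :=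
  D.insert i ((D.getD i ∅).insert k v)

def pvGet (D : Std.TreeMap Int (Std.TreeMap Int Int)) (a b : Int) : Int :=
  (D.getD a ∅).getD b 0

-- for i in range(1, 10): if i <= B: D[1][i] = 1
def pvInitStep (B : Int) (D : Std.TreeMap Int (Std.TreeMap Int Int)) (i : Int) : Std.TreeMap Int (Std.TreeMap Int Int) :=
  if i ≤ B then pvUpd D 1 i 1 else D

-- for j in range(1, 10): if k+j <= B: D[i][k+j] = (D[i][k+j] + D[i-1][k]) % M
def pvPushStep (B i k : Int) (D : Std.TreeMap Int (Std.TreeMap Int Int)) (j : Int) : Std.TreeMap Int (Std.TreeMap Int Int) :=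
  if k + j ≤ B then
    pvUpd D i (k + j) (PySem.Int.mod (pvGet D i (k + j) + pvGet D (i - 1) k) 1000000007)
  else D

-- body of 'for k in range(1, B+1)': the self update, then the j-push loop
def pvRowStep (B i : Int) (D : Std.TreeMap Int (Std.TreeMap Int Int)) (k : Int) : Std.TreeMap Int (Std.TreeMap Int Int) :=
  let D' := pvUpd D i k (PySem.Int.mod (pvGet D i k + pvGet D (i - 1) k) 1000000007)
  (PySem.List.pyRange 1 10).foldl (pvPushStep B i k) D'

-- body of 'for i in range(2, A+1)'
def pvOuterStep (B : Int) (D : Std.TreeMap Int (Std.TreeMap Int Int)) (i : Int) : Std.TreeMap Int (Std.TreeMap Int Int) :=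
  (PySem.List.pyRange 1 (B + 1)).foldl (pvRowStep B i) D

def solve (A : Int) (B : Int) : Int :=
  let D1 := (PySem.List.pyRange 1 10).foldl (pvInitStep B) (∅ : Std.TreeMap Int (Std.TreeMap Int Int))
  let D2 := (PySem.List.pyRange 2 (A + 1)).foldl (pvOuterStep B) D1
  pvGet D2 A B

-- ===== PORT B =====
-- Source B's lists 'row' and 'pref' are modeled as (index, value) lists read with pvGet1
-- (first match wins; pref's cells, zero-initialized by [0]*(B+2), read 0 until assigned).
def pvGet1 (L : List (Int × Int)) (x : Int) : Int :=
  match L with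
  | [] => 0
  | (k, v) :: L => if x = k then v else pvGet1 L x

-- pref[s+1] = (pref[s] + row[s]) % M
def pvPrefStep (row pref : List (Int × Int)) (s : Int) : List (Int × Int) :=
  (s + 1, PySem.Int.mod (pvGet1 pref s + pvGet1 row s) 1000000007) :: pref

-- body of 'for _ in range(A-1)': build pref, then the new row by window subtraction
def pvIterStep (B : Int) (row : List (Int × Int)) (_ : Int) : List (Int × Int) :=
  let pref := (PySem.List.pyRange 0 (B + 1)).foldl (pvPrefStep row) []
  (PySem.List.pyRange 0 (B + 1)).map (fun s =>
    (s, PySem.Int.mod (pvGet1 pref (s + 1) - pvGet1 pref (if 9 ≤ s then s - 9 else 0)) 1000000007))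

def solve_alt (A : Int) (B : Int) : Int :=
  let row0 := (PySem.List.pyRange 0 (B + 1)).map
    (fun s => (s, if 1 ≤ s ∧ s ≤ 9 then (1 : Int) else 0))
  pvGet1 ((PySem.List.pyRange 0 (A - 1)).foldl (pvIterStep B) row0) B

-- ===== PRECONDITION & SPEC =====
-- Python A raises IndexError when A < 0, B < 0, or A = 0 with B ≥ 1 (it indexes D[1] / D[A][B]
-- in a table of A+1 rows and B+1 columns); exactly those inputs are excluded.
def Pre_solve (A : Int) (B : Int) : Prop := (1 ≤ A ∧ 0 ≤ B) ∨ (A = 0 ∧ B = 0)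
instance (A : Int) (B : Int) : Decidable (Pre_solve A B) := by unfold Pre_solve; infer_instance
def pvWitness_solve : Int × Int := (3, 10)

def Spec_solve (A : Int) (B : Int) (out : Int) : Prop := out = solve_alt A B
instance (A : Int) (B : Int) (out : Int) : Decidable (Spec_solve A B out) := by unfold Spec_solve; infer_instance

-- ===== CLAIM (what is proved, stated in full; the proofs are below) =====
def Claim_equal_solve : Prop := ∀ (A : Int) (B : Int), Dom_solve A B → Pre_solve A B → Spec_solve A B (solve A B)

-- ===== LEMMAS AND PROOFS =====

theorem pvGet_upd (D : Std.TreeMap Int (Std.TreeMap Int Int)) (i k v a b : Int) :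
    pvGet (pvUpd D i k v) a b = if a = i ∧ b = k then v else pvGet D a b := by
  unfold pvGet pvUpd
  rw [Std.TreeMap.getD_insert]
  by_cases hai : a = i
  · subst hai
    rw [if_pos (by rw [compare_eq_iff_eq]), Std.TreeMap.getD_insert]
    by_cases hbk : b = k
    · subst hbk
      rw [if_pos (by rw [compare_eq_iff_eq]), if_pos ⟨rfl, rfl⟩]
    · rw [if_neg (by rw [compare_eq_iff_eq]; omega), if_neg (by omega)]
  · rw [if_neg (by rw [compare_eq_iff_eq]; omega), if_neg (by omega)]

theorem pvGet_empty (a b : Int) : pvGet (∅ : Std.TreeMap Int (Std.TreeMap Int Int)) a b = 0 := by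
  unfold pvGet
  rw [Std.TreeMap.getD_emptyc, Std.TreeMap.getD_emptyc]

theorem pvGet1_cons (k v : Int) (L : List (Int × Int)) (x : Int) :
    pvGet1 ((k, v) :: L) x = if x = k then v else pvGet1 L x := rfl

-- reading an (index, value) list built by a comprehension over range(a, a+n)
theorem pvGet1_map (f : Int → Int) (n : Nat) : ∀ (a s : Int),
    pvGet1 ((PySem.List.pyRange a (a + (n : Int))).map (fun u => (u, f u))) s
      = if a ≤ s ∧ s < a + (n : Int) then f s else 0 := by
  induction n with
  | zero =>
    intro a s
    rw [Nat.cast_zero, add_zero, show PySem.List.pyRange a a = [] by simp [pysem]]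
    simp only [List.map_nil]
    rw [show pvGet1 [] s = 0 from rfl, if_neg (by omega)]
  | succ n ih =>
    intro a s
    rw [PySem.List.pyRange_one_cons (by push_cast; omega)]
    simp only [List.map_cons]
    rw [pvGet1_cons]
    by_cases hs : s = a
    · rw [if_pos hs, hs, if_pos (by push_cast; omega)]
    · rw [if_neg hs]
      have h := ih (a + 1) s
      rw [show a + 1 + (n : Int) = a + ((n + 1 : Nat) : Int) by push_cast; ring] at h
      rw [h]
      have hiff : (a + 1 ≤ s ∧ s < a + ((n + 1 : Nat) : Int))
          ↔ (a ≤ s ∧ s < a + ((n + 1 : Nat) : Int)) := by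
        constructor <;> intro <;> constructor <;> omega
      rw [if_congr hiff rfl rfl]

-- Reference value: pvF t s = number of (t+1)-digit numbers (leading digit 1..9) with digit sum s, mod 10^9+7.
def pvF : Nat → Int → Int
  | 0, s => if 1 ≤ s ∧ s ≤ 9 then 1 else 0
  | t + 1, s => if s < 0 then 0 else (∑ j ∈ Finset.range 10, pvF t (s - (j : Int))) % 1000000007

theorem pvF_nonpos (t : Nat) (s : Int) (hs : s ≤ 0) : pvF t s = 0 := by
  induction t generalizing s with
  | zero => simp only [pvF]; rw [if_neg]; omega
  | succ t ih =>
    simp only [pvF]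
    rcases lt_or_eq_of_le hs with h | h
    · rw [if_pos h]
    · subst h
      rw [if_neg (by omega)]
      rw [Finset.sum_eq_zero fun j _ => ih _ (by omega)]
      simp

theorem pvmod (x : Int) : PySem.Int.mod x 1000000007 = x % 1000000007 :=
  PySem.Int.mod_eq_emod_of_pos (by norm_num)

-- ----- A side -----

-- value of row 1 after the init loop prefix [1, 1+n)
theorem pvInitInv (B : Int) (n : Nat) (a b : Int) :
    pvGet ((PySem.List.pyRange 1 (1 + (n : Int))).foldl (pvInitStep B) (∅ : Std.TreeMap Int (Std.TreeMap Int Int))) a b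
      = if a = 1 ∧ 1 ≤ b ∧ b < 1 + (n : Int) ∧ b ≤ B then 1 else 0 := by
  induction n with
  | zero =>
    rw [show (1 + ((0 : Nat) : Int)) = 1 by norm_num,
      show PySem.List.pyRange 1 1 = [] by simp [pysem]]
    simp only [List.foldl_nil]
    rw [pvGet_empty, if_neg (by omega)]
  | succ n ih =>
    rw [show (1 + ((n + 1 : Nat) : Int)) = (1 + (n : Int)) + 1 by push_cast; ring,
      PySem.List.pyRange_one_succ_right (by omega), List.foldl_append]
    simp only [List.foldl_cons, List.foldl_nil, pvInitStep]
    by_cases h : (1 + (n : Int)) ≤ B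
    · rw [if_pos h, pvGet_upd, ih]
      split_ifs <;> omega
    · rw [if_neg h, ih]
      split_ifs <;> omega

-- partial new-row value while the k-loop of row i has processed k ∈ [1, K]
def pvT (p : Int → Int) (B K b : Int) : Int :=
  ∑ j ∈ Finset.range 10, if 1 ≤ b - (j : Int) ∧ b - (j : Int) ≤ K ∧ b ≤ B then p (b - (j : Int)) else 0

theorem pvT_zero (p : Int → Int) (B b : Int) : pvT p B 0 b = 0 := by
  refine Finset.sum_eq_zero fun j _ => ?_
  rw [if_neg (by omega)]

theorem pvT_out (p : Int → Int) (B K b : Int) (hb : b ≤ 0 ∨ B < b) : pvT p B K b = 0 := by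
  refine Finset.sum_eq_zero fun j hj => ?_
  simp only [Finset.mem_range] at hj
  rw [if_neg (by omega)]

theorem pvT_step (p : Int → Int) (B K b : Int) (hK : 1 ≤ K) :
    pvT p B K b = pvT p B (K - 1) b + (if K ≤ b ∧ b ≤ K + 9 ∧ b ≤ B then p K else 0) := by
  by_cases hb : K ≤ b ∧ b ≤ K + 9
  · have hj0 : (b - K).toNat ∈ Finset.range 10 := by
      simp only [Finset.mem_range]; omega
    have hcast : ((b - K).toNat : Int) = b - K := by omega
    unfold pvT
    rw [← Finset.add_sum_erase _ _ hj0, ← Finset.add_sum_erase _ _ hj0]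
    have herase : ∀ j ∈ (Finset.range 10).erase (b - K).toNat,
        (if 1 ≤ b - (j : Int) ∧ b - (j : Int) ≤ K ∧ b ≤ B then p (b - (j : Int)) else 0)
          = (if 1 ≤ b - (j : Int) ∧ b - (j : Int) ≤ K - 1 ∧ b ≤ B then p (b - (j : Int)) else 0) := by
      intro j hj
      simp only [Finset.mem_erase, Finset.mem_range] at hj
      have hne : (j : Int) ≠ b - K := fun h => hj.1 (by omega)
      have hiff : (1 ≤ b - (j : Int) ∧ b - (j : Int) ≤ K ∧ b ≤ B)
          ↔ (1 ≤ b - (j : Int) ∧ b - (j : Int) ≤ K - 1 ∧ b ≤ B) := by omega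
      simp only [hiff]
    rw [Finset.sum_congr rfl herase, hcast, show b - (b - K) = K by ring]
    split_ifs <;> omega
  · rw [if_neg (by omega), add_zero]
    refine Finset.sum_congr rfl fun j hj => ?_
    simp only [Finset.mem_range] at hj
    have hiff : (1 ≤ b - (j : Int) ∧ b - (j : Int) ≤ K ∧ b ≤ B)
        ↔ (1 ≤ b - (j : Int) ∧ b - (j : Int) ≤ K - 1 ∧ b ≤ B) := by omega
    simp only [hiff]

theorem pvT_final (p : Int → Int) (t : Nat) (B b : Int)
    (hp : ∀ x, p x = if 1 ≤ x ∧ x ≤ B then pvF t x else 0)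
    (hb0 : 0 ≤ b) (hbB : b ≤ B) : pvT p B B b % 1000000007 = pvF (t + 1) b := by
  have : pvT p B B b = ∑ j ∈ Finset.range 10, pvF t (b - (j : Int)) := by
    refine Finset.sum_congr rfl fun j hj => ?_
    simp only [Finset.mem_range] at hj
    by_cases h1 : 1 ≤ b - (j : Int)
    · rw [if_pos (by omega), hp, if_pos (by omega)]
    · rw [if_neg (by omega), pvF_nonpos t _ (by omega)]
  rw [this, pvF]
  rw [if_neg (by omega)]

theorem pvPushInv (B i K : Int) (D : Std.TreeMap Int (Std.TreeMap Int Int)) (n : Nat) (hn : n ≤ 9) (a b : Int) :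
    pvGet ((PySem.List.pyRange 1 (1 + (n : Int))).foldl (pvPushStep B i K) D) a b
      = if a = i ∧ K + 1 ≤ b ∧ b ≤ K + (n : Int) ∧ b ≤ B
        then (pvGet D i b + pvGet D (i - 1) K) % 1000000007 else pvGet D a b := by
  induction n generalizing a b with
  | zero =>
    rw [show (1 + ((0 : Nat) : Int)) = 1 by norm_num,
      show PySem.List.pyRange 1 1 = [] by simp [pysem]]
    simp only [List.foldl_nil]
    rw [if_neg (by omega)]
  | succ n ih =>
    rw [show (1 + ((n + 1 : Nat) : Int)) = (1 + (n : Int)) + 1 by push_cast; ring,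
      PySem.List.pyRange_one_succ_right (by omega), List.foldl_append]
    simp only [List.foldl_cons, List.foldl_nil, pvPushStep]
    have hii : i - 1 ≠ i := by omega
    by_cases hKB : K + (1 + (n : Int)) ≤ B
    · rw [if_pos hKB]
      have hE1 : pvGet (List.foldl (pvPushStep B i K) D (PySem.List.pyRange 1 (1 + (n : Int))))
          i (K + (1 + (n : Int))) = pvGet D i (K + (1 + (n : Int))) := by
        rw [ih (by omega)]; rw [if_neg (by omega)]
      have hE2 : pvGet (List.foldl (pvPushStep B i K) D (PySem.List.pyRange 1 (1 + (n : Int))))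
          (i - 1) K = pvGet D (i - 1) K := by
        rw [ih (by omega)]; rw [if_neg (by omega)]
      rw [pvGet_upd, hE1, hE2, pvmod]
      by_cases hai : a = i ∧ b = K + (1 + (n : Int))
      · obtain ⟨rfl, rfl⟩ := hai
        rw [if_pos ⟨rfl, rfl⟩, if_pos (by push_cast; omega)]
      · rw [if_neg hai, ih (by omega) a b]
        have hiff : (a = i ∧ K + 1 ≤ b ∧ b ≤ K + (n : Int) ∧ b ≤ B)
            ↔ (a = i ∧ K + 1 ≤ b ∧ b ≤ K + ((n + 1 : Nat) : Int) ∧ b ≤ B) := by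
          push_cast
          constructor
          · rintro ⟨h1, h2, h3, h4⟩; exact ⟨h1, h2, by omega, h4⟩
          · rintro ⟨h1, h2, h3, h4⟩
            refine ⟨h1, h2, ?_, h4⟩
            rcases eq_or_ne b (K + (1 + (n : Int))) with hbe | hbe
            · exact absurd ⟨h1, by omega⟩ hai
            · omega
        rw [if_congr hiff rfl rfl]
    · rw [if_neg hKB, ih (by omega) a b]
      have hiff : (a = i ∧ K + 1 ≤ b ∧ b ≤ K + (n : Int) ∧ b ≤ B)
          ↔ (a = i ∧ K + 1 ≤ b ∧ b ≤ K + ((n + 1 : Nat) : Int) ∧ b ≤ B) := by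
        push_cast; omega
      rw [if_congr hiff rfl rfl]

theorem pvKLoopInv (B i : Int) (p : Int → Int) (D : Std.TreeMap Int (Std.TreeMap Int Int))
    (hprev : ∀ b, pvGet D (i - 1) b = p b) (hcur : ∀ b, pvGet D i b = 0)
    (n : Nat) (hnB : (n : Int) ≤ B) (a b : Int) :
    pvGet ((PySem.List.pyRange 1 (1 + (n : Int))).foldl (pvRowStep B i) D) a b
      = if a = i then pvT p B (n : Int) b % 1000000007 else pvGet D a b := by
  induction n generalizing a b with
  | zero =>
    rw [show (1 + ((0 : Nat) : Int)) = 1 by norm_num,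
      show PySem.List.pyRange 1 1 = [] by simp [pysem]]
    simp only [List.foldl_nil]
    rcases eq_or_ne a i with rfl | hai
    · rw [if_pos rfl, hcur, Nat.cast_zero, pvT_zero]
      norm_num
    · rw [if_neg hai]
  | succ n ih =>
    have hnB' : (n : Int) ≤ B := by push_cast at hnB; omega
    have hKB : 1 + (n : Int) ≤ B := by push_cast at hnB; omega
    rw [show (1 + ((n + 1 : Nat) : Int)) = (1 + (n : Int)) + 1 by push_cast; ring,
      PySem.List.pyRange_one_succ_right (by omega), List.foldl_append]
    simp only [List.foldl_cons, List.foldl_nil]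
    set E := List.foldl (pvRowStep B i) D (PySem.List.pyRange 1 (1 + (n : Int))) with hE
    have hEi : ∀ c, pvGet E i c = pvT p B (n : Int) c % 1000000007 := fun c => by
      rw [ih hnB', if_pos rfl]
    have hEp : ∀ c, pvGet E (i - 1) c = p c := fun c => by
      rw [ih hnB', if_neg (by omega), hprev]
    have hEo : ∀ c d, c ≠ i → pvGet E c d = pvGet D c d := fun c d hc => by
      rw [ih hnB', if_neg hc]
    have hstep : ∀ c, pvT p B (1 + (n : Int)) c
        = pvT p B (n : Int) c
          + (if 1 + (n : Int) ≤ c ∧ c ≤ 1 + (n : Int) + 9 ∧ c ≤ B then p (1 + (n : Int)) else 0) := by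
      intro c
      have h := pvT_step p B (1 + (n : Int)) c (by omega)
      rwa [show (1 + (n : Int)) - 1 = (n : Int) by ring] at h
    rw [show ((n + 1 : Nat) : Int) = 1 + (n : Int) by push_cast; ring]
    simp only [pvRowStep]
    rw [show (10 : Int) = 1 + ((9 : Nat) : Int) by norm_num,
      pvPushInv B i (1 + (n : Int)) _ 9 (by omega) a b]
    rcases eq_or_ne a i with rfl | hai
    · rw [if_pos rfl]
      by_cases hbK : b = 1 + (n : Int)
      · subst hbK
        rw [if_neg (by omega), pvGet_upd, if_pos ⟨rfl, rfl⟩, hEi, hEp, pvmod,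
          Int.emod_add_emod, hstep, if_pos ⟨le_refl _, by omega, hKB⟩]
      · by_cases hpush : 1 + (n : Int) + 1 ≤ b ∧ b ≤ 1 + (n : Int) + 9 ∧ b ≤ B
        · rw [if_pos ⟨rfl, hpush.1, hpush.2.1, hpush.2.2⟩, pvGet_upd, pvGet_upd,
            if_neg (by omega), if_neg (by omega), hEi, hEp, Int.emod_add_emod, hstep,
            if_pos ⟨by omega, hpush.2.1, hpush.2.2⟩]
        · rw [if_neg (by omega), pvGet_upd, if_neg (by omega), hEi, hstep,
            if_neg (by omega), add_zero]
    · rw [if_neg (by omega), if_neg hai, pvGet_upd, if_neg (by omega), hEo a b hai]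

theorem pvOuterInv (B : Int) (hB : 0 ≤ B) (D : Std.TreeMap Int (Std.TreeMap Int Int))
    (hD : ∀ a b, pvGet D a b = if a = 1 ∧ 1 ≤ b ∧ b ≤ B then pvF 0 b else 0)
    (m : Nat) (a b : Int) :
    pvGet ((PySem.List.pyRange 2 (2 + (m : Int))).foldl (pvOuterStep B) D) a b
      = if 1 ≤ a ∧ a ≤ 1 + (m : Int) ∧ 1 ≤ b ∧ b ≤ B then pvF (a - 1).toNat b else 0 := by
  induction m generalizing a b with
  | zero =>
    rw [show (2 + ((0 : Nat) : Int)) = 2 by norm_num,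
      show PySem.List.pyRange 2 2 = [] by simp [pysem]]
    simp only [List.foldl_nil]
    rw [hD]
    by_cases h : a = 1 ∧ 1 ≤ b ∧ b ≤ B
    · rw [if_pos h, if_pos (by push_cast; omega)]
      rw [h.1, show ((1 : Int) - 1).toNat = 0 from rfl]
    · rw [if_neg h, if_neg (by push_cast; omega)]
  | succ m ih =>
    rw [show (2 + ((m + 1 : Nat) : Int)) = (2 + (m : Int)) + 1 by push_cast; ring,
      PySem.List.pyRange_one_succ_right (by omega), List.foldl_append]
    simp only [List.foldl_cons, List.foldl_nil]
    set E := List.foldl (pvOuterStep B) D (PySem.List.pyRange 2 (2 + (m : Int))) with hE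
    have hprev : ∀ c, pvGet E (2 + (m : Int) - 1) c
        = (fun c => if 1 ≤ c ∧ c ≤ B then pvF m c else 0) c := by
      intro c
      show pvGet E (2 + (m : Int) - 1) c = if 1 ≤ c ∧ c ≤ B then pvF m c else 0
      by_cases hc : 1 ≤ c ∧ c ≤ B
      · rw [ih _ c, if_pos ⟨by omega, by omega, hc.1, hc.2⟩, if_pos hc,
          show (2 + (m : Int) - 1 - 1) = (m : Int) by ring, Int.toNat_natCast]
      · rw [ih _ c, if_neg (by omega), if_neg hc]
    have hcur : ∀ c, pvGet E (2 + (m : Int)) c = 0 := fun c => by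
      rw [ih _ c, if_neg (by omega)]
    have hBcast : ((B.toNat : Int)) = B := Int.toNat_of_nonneg hB
    simp only [pvOuterStep]
    rw [show B + 1 = 1 + ((B.toNat : Int)) by omega,
      pvKLoopInv B (2 + (m : Int)) _ E hprev hcur B.toNat (by omega) a b, hBcast]
    rcases eq_or_ne a (2 + (m : Int)) with rfl | hai
    · rw [if_pos rfl]
      by_cases hbB : 1 ≤ b ∧ b ≤ B
      · rw [if_pos ⟨by omega, by push_cast; omega, hbB.1, hbB.2⟩,
          pvT_final _ m B b (fun x => rfl) (by omega) hbB.2,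
          show (2 + (m : Int) - 1) = ((m + 1 : Nat) : Int) by push_cast; ring,
          Int.toNat_natCast]
      · rw [if_neg (by push_cast; omega), pvT_out _ B B b (by omega)]
        norm_num
    · rw [if_neg hai, ih _ b]
      have hiff : (1 ≤ a ∧ a ≤ 1 + (m : Int) ∧ 1 ≤ b ∧ b ≤ B)
          ↔ (1 ≤ a ∧ a ≤ 1 + ((m + 1 : Nat) : Int) ∧ 1 ≤ b ∧ b ≤ B) := by
        push_cast; omega
      rw [if_congr hiff rfl rfl]

theorem pvSolveA (A B : Int) (hA : 1 ≤ A) (hB : 0 ≤ B) : solve A B = pvF (A - 1).toNat B := by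
  simp only [solve]
  have hD : ∀ a b, pvGet ((PySem.List.pyRange 1 10).foldl (pvInitStep B)
      (∅ : Std.TreeMap Int (Std.TreeMap Int Int))) a b
      = if a = 1 ∧ 1 ≤ b ∧ b ≤ B then pvF 0 b else 0 := by
    intro a b
    rw [show (10 : Int) = 1 + ((9 : Nat) : Int) by norm_num, pvInitInv]
    simp only [pvF]
    split_ifs <;> omega
  rw [show A + 1 = 2 + (((A - 1).toNat : Int)) by omega,
    pvOuterInv B hB _ hD (A - 1).toNat A B]
  by_cases hb : 1 ≤ B
  · rw [if_pos ⟨by omega, by omega, hb, le_refl B⟩]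
  · rw [if_neg (by omega), pvF_nonpos _ B (by omega)]

-- ----- B side -----

theorem pvPrefInv (row : List (Int × Int)) (n : Nat) (x : Int) :
    pvGet1 ((PySem.List.pyRange 0 (n : Int)).foldl (pvPrefStep row) []) x
      = if 1 ≤ x ∧ x ≤ (n : Int)
        then (∑ t ∈ Finset.range x.toNat, pvGet1 row (t : Int)) % 1000000007 else 0 := by
  induction n generalizing x with
  | zero =>
    rw [Nat.cast_zero, show PySem.List.pyRange 0 0 = [] by simp [pysem]]
    simp only [List.foldl_nil]
    rw [show pvGet1 [] x = 0 from rfl, if_neg (by omega)]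
  | succ n ih =>
    rw [show ((n + 1 : Nat) : Int) = (n : Int) + 1 by push_cast; ring,
      PySem.List.pyRange_one_succ_right (by omega), List.foldl_append]
    simp only [List.foldl_cons, List.foldl_nil, pvPrefStep]
    rw [pvGet1_cons]
    have hn : pvGet1 (List.foldl (pvPrefStep row) [] (PySem.List.pyRange 0 (n : Int))) (n : Int)
        = (∑ t ∈ Finset.range n, pvGet1 row (t : Int)) % 1000000007 := by
      by_cases h1 : 1 ≤ (n : Int)
      · rw [ih, if_pos ⟨h1, le_refl _⟩, Int.toNat_natCast]
      · have h0 : n = 0 := by omega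
        subst h0
        rw [ih, if_neg (by omega)]
        simp
    by_cases hx : x = (n : Int) + 1
    · subst hx
      rw [if_pos rfl, hn, pvmod, Int.emod_add_emod, if_pos ⟨by omega, le_refl _⟩]
      congr 1
      rw [show ((n : Int) + 1).toNat = n + 1 by omega, Finset.sum_range_succ]
    · rw [if_neg hx, ih]
      have hiff : (1 ≤ x ∧ x ≤ (n : Int)) ↔ (1 ≤ x ∧ x ≤ (n : Int) + 1) := by omega
      rw [if_congr hiff rfl rfl]

theorem pvWindowSum (g : Int → Int) (hg : ∀ x, x ≤ 0 → g x = 0) (s : Int) (hs : 0 ≤ s) :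
    ∑ t ∈ Finset.Ico (if 9 ≤ s then s - 9 else 0).toNat (s + 1).toNat, g (t : Int)
      = ∑ j ∈ Finset.range 10, g (s - (j : Int)) := by
  by_cases h9 : 9 ≤ s
  · rw [if_pos h9, Finset.sum_Ico_eq_sum_range,
      show (s + 1).toNat - (s - 9).toNat = 10 by omega, ← Finset.sum_range_reflect]
    refine Finset.sum_congr rfl fun j hj => ?_
    simp only [Finset.mem_range] at hj
    congr 1
    omega
  · rw [if_neg h9, show ((0 : Int)).toNat = 0 from rfl, ← Finset.range_eq_Ico]
    have hsub : ∑ j ∈ Finset.range 10, g (s - (j : Int))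
        = ∑ j ∈ Finset.range (s + 1).toNat, g (s - (j : Int)) := by
      symm
      apply Finset.sum_subset (Finset.range_subset_range.mpr (show (s + 1).toNat ≤ 10 by omega))
      intro j hj hjm
      simp only [Finset.mem_range] at hj hjm
      exact hg _ (by omega)
    rw [hsub, ← Finset.sum_range_reflect]
    refine Finset.sum_congr rfl fun j hj => ?_
    simp only [Finset.mem_range] at hj
    congr 1
    omega

theorem pvIterStepEq (B : Int) (hB : 0 ≤ B) (r : List (Int × Int)) (t : Nat)
    (hr : ∀ s, 0 ≤ s → s ≤ B → pvGet1 r s = pvF t s) (x s : Int) (hs0 : 0 ≤ s) (hsB : s ≤ B) :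
    pvGet1 (pvIterStep B r x) s = pvF (t + 1) s := by
  simp only [pvIterStep]
  rw [show B + 1 = 0 + (((B + 1).toNat : Nat) : Int) by omega, pvGet1_map, if_pos (by omega)]
  rw [show (0 : Int) + (((B + 1).toNat : Nat) : Int) = (((B + 1).toNat : Nat) : Int) by ring]
  have hpref : ∀ x, 0 ≤ x → x ≤ B + 1 →
      pvGet1 (List.foldl (pvPrefStep r) [] (PySem.List.pyRange 0 (((B + 1).toNat : Nat) : Int))) x
        = (∑ u ∈ Finset.range x.toNat, pvGet1 r (u : Int)) % 1000000007 := by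
    intro x hx0 hx1
    by_cases h1 : 1 ≤ x
    · rw [pvPrefInv, if_pos ⟨h1, by omega⟩]
    · have h0 : x = 0 := by omega
      subst h0
      rw [pvPrefInv, if_neg (by omega)]
      simp
  rw [hpref (s + 1) (by omega) (by omega),
    hpref (if 9 ≤ s then s - 9 else 0) (by split_ifs <;> omega) (by split_ifs <;> omega),
    pvmod, ← Int.sub_emod,
    ← Finset.sum_Ico_eq_sub _ (show (if 9 ≤ s then s - 9 else 0).toNat ≤ (s + 1).toNat by
      split_ifs <;> omega)]
  have hrepl : ∑ u ∈ Finset.Ico (if 9 ≤ s then s - 9 else 0).toNat (s + 1).toNat, pvGet1 r (u : Int)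
      = ∑ u ∈ Finset.Ico (if 9 ≤ s then s - 9 else 0).toNat (s + 1).toNat, pvF t (u : Int) := by
    refine Finset.sum_congr rfl fun u hu => ?_
    simp only [Finset.mem_Ico] at hu
    exact hr _ (by omega) (by omega)
  rw [hrepl, pvWindowSum (pvF t) (pvF_nonpos t) s hs0]
  simp only [pvF]
  rw [if_neg (by omega)]

theorem pvIterLoop (B : Int) (hB : 0 ≤ B) (m : Nat) :
    ∀ s, 0 ≤ s → s ≤ B →
    pvGet1 ((PySem.List.pyRange 0 (m : Int)).foldl (pvIterStep B)
      ((PySem.List.pyRange 0 (B + 1)).map (fun s => (s, if 1 ≤ s ∧ s ≤ 9 then (1 : Int) else 0)))) s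
      = pvF m s := by
  induction m with
  | zero =>
    intro s hs0 hsB
    rw [Nat.cast_zero, show PySem.List.pyRange 0 0 = [] by simp [pysem]]
    simp only [List.foldl_nil]
    rw [show B + 1 = 0 + (((B + 1).toNat : Nat) : Int) by omega, pvGet1_map, if_pos (by omega)]
    simp only [pvF]
  | succ m ih =>
    intro s hs0 hsB
    rw [show ((m + 1 : Nat) : Int) = (m : Int) + 1 by push_cast; ring,
      show PySem.List.pyRange 0 ((m : Int) + 1) = PySem.List.pyRange 0 (m : Int) ++ [(m : Int)]
        from PySem.List.pyRange_one_succ_right (by omega),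
      List.foldl_append]
    simp only [List.foldl_cons, List.foldl_nil]
    exact pvIterStepEq B hB _ m (fun c hc0 hcB => ih c hc0 hcB) _ s hs0 hsB

theorem pvSolveB (A B : Int) (hA : 1 ≤ A) (hB : 0 ≤ B) : solve_alt A B = pvF (A - 1).toNat B := by
  show pvGet1 ((PySem.List.pyRange 0 (A - 1)).foldl (pvIterStep B)
      ((PySem.List.pyRange 0 (B + 1)).map (fun s => (s, if 1 ≤ s ∧ s ≤ 9 then (1 : Int) else 0)))) B = _
  rw [show A - 1 = (((A - 1).toNat : Nat) : Int) by omega]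
  exact pvIterLoop B hB (A - 1).toNat B hB (le_refl B)

-- ===== VERDICT (by name: the statement is the Claim_ definition above) =====
theorem solve_spec : Claim_equal_solve := by
  intro A B _ hPre
  unfold Spec_solve
  rcases hPre with ⟨hA, hB⟩ | ⟨hA, hB⟩
  · rw [pvSolveA A B hA hB, pvSolveB A B hA hB]
  · subst hA; subst hB; decide
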